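-- pv_equiv track=rewrite | github.com/zergud1488/AmperShop | app.py | build_status_keyboard
-- ===== SOURCE A (Python) =====
-- ORDER_STATUS_OPTIONS = [
--     ("new", "Нове замовлення"),
--     ("processing", "В роботі"),
--     ("confirmed", "Підтверджено"),
--     ("shipped", "Відправлено"),
--     ("completed", "Завершено"),
--     ("cancelled", "Скасовано"),
-- ]
--
-- def build_status_keyboard(order_id):
--     rows = []
--     current_row = []
--     for slug, label in ORDER_STATUS_OPTIONS:
--         current_row.append({"text": label, "callback_data": f"ord|{order_id}|{slug}"})
--         if len(current_row) == 2:
--             rows.append(current_row)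
--             current_row = []
--     if current_row:
--         rows.append(current_row)
--     return {"inline_keyboard": rows}
-- ===== SOURCE B (Python) =====
-- ORDER_STATUS_OPTIONS = [
--     ("new", "Нове замовлення"),
--     ("processing", "В роботі"),
--     ("confirmed", "Підтверджено"),
--     ("shipped", "Відправлено"),
--     ("completed", "Завершено"),
--     ("cancelled", "Скасовано"),
-- ]
--
-- def build_status_keyboard(order_id):
--     buttons = [{"text": label, "callback_data": f"ord|{order_id}|{slug}"}
--                for slug, label in ORDER_STATUS_OPTIONS]
--     rows = [buttons[i:i + 2] for i in range(0, len(buttons), 2)]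
--     return {"inline_keyboard": rows}
-- ===== Notes on version B (the rewrite author's own statement) =====
-- stated objective: alternative
-- what changed: Replaced A's running current_row buffer with explicit flush-on-length-2 by a two-phase map-then-slice: build the flat button list in one comprehension, then chunk it into rows of two with index slicing.
import Mathlib
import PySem

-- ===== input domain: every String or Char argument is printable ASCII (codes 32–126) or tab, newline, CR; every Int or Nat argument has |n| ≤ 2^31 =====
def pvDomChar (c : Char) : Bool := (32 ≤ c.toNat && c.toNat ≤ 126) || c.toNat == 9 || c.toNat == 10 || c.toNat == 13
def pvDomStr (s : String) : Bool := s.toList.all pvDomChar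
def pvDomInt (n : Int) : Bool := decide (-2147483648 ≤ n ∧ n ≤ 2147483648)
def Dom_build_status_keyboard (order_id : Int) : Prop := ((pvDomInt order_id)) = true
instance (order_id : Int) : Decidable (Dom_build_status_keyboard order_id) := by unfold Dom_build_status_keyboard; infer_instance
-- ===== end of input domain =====

-- B replaces A's running row buffer by a map-then-slice two-phase construction (alternative decomposition, same cost).

def ORDER_STATUS_OPTIONS : List (String × String) :=
  [("new", "Нове замовлення"),
   ("processing", "В роботі"),
   ("confirmed", "Підтверджено"),
   ("shipped", "Відправлено"),
   ("completed", "Завершено"),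
   ("cancelled", "Скасовано")]

-- one button dict {"text": label, "callback_data": f"ord|{order_id}|{slug}"}
def pvButton (order_id : Int) (slug label : String) : List (String × String) :=
  [("text", label), ("callback_data", "ord|" ++ PySem.Int.toStr order_id ++ "|" ++ slug)]

-- ===== PORT A =====
-- loop state: (rows, current_row); flush current_row when its length reaches 2
def buildA_loop (order_id : Int) :
    List (String × String) →
    List (List (List (String × String))) × List (List (String × String)) →
    List (List (List (String × String))) × List (List (String × String))
  | opts, (rows, current_row) =>
    match opts with
    | [] => (rows, current_row)
    | (slug, label) :: rest =>
      let current_row := current_row ++ [pvButton order_id slug label]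
      if current_row.length == 2 then
        buildA_loop order_id rest (rows ++ [current_row], [])
      else
        buildA_loop order_id rest (rows, current_row)

def build_status_keyboard (order_id : Int) : List (String × List (List (List (String × String)))) :=
  let (rows, current_row) := buildA_loop order_id ORDER_STATUS_OPTIONS ([], [])
  let rows := if current_row ≠ [] then rows ++ [current_row] else rows
  [("inline_keyboard", rows)]

-- ===== PORT B =====
-- buttons = one comprehension; rows = [buttons[i:i+2] for i in range(0, len(buttons), 2)]
def build_status_keyboard_alt (order_id : Int) : List (String × List (List (List (String × String)))) :=
  let buttons := ORDER_STATUS_OPTIONS.map (fun sl => pvButton order_id sl.1 sl.2)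
  let rows := (PySem.List.pyRange 0 (Int.ofNat buttons.length) 2).map
      (fun i => PySem.List.slice buttons (some i) (some (i + 2)))
  [("inline_keyboard", rows)]

-- ===== PRECONDITION & SPEC =====
def Spec_build_status_keyboard (order_id : Int) (out : List (String × List (List (List (String × String))))) : Prop := out = build_status_keyboard_alt order_id
instance (order_id : Int) (out : List (String × List (List (List (String × String))))) : Decidable (Spec_build_status_keyboard order_id out) := by unfold Spec_build_status_keyboard; infer_instance

-- ===== CLAIM (what is proved, stated in full; the proofs are below) =====
def Claim_equal_build_status_keyboard : Prop := ∀ (order_id : Int), Dom_build_status_keyboard order_id → Spec_build_status_keyboard order_id (build_status_keyboard order_id)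

-- ===== LEMMAS AND PROOFS =====

-- ===== VERDICT (by name: the statement is the Claim_ definition above) =====
theorem build_status_keyboard_spec : Claim_equal_build_status_keyboard := by
  intro order_id _
  unfold Spec_build_status_keyboard build_status_keyboard build_status_keyboard_alt
  simp [buildA_loop, ORDER_STATUS_OPTIONS, PySem.List.pyRange, PySem.List.slice, List.range_succ]
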